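-- pv_equiv track=rewrite | github.com/taddyb33/t-route-dev | src/python_framework_v02/troute/nhd_network.py | reachable
-- ===== SOURCE A (Python) =====
-- from collections import defaultdict, Counter, deque
-- from itertools import chain
--
-- def headwaters(N):
--     yield from N.keys() - chain.from_iterable(N.values())
--
-- def reachable(N, sources=None, targets=None):
--     """
--     Return nodes reachable from sources.
--     Args:
--         N:
--         sources (iterable): If None, source nodes are used.
--         targets (iterable): Target nodes to stop searching.
--
--     Returns:
--     """
--     if sources is None:
--         sources = headwaters(N)
--
--     rv = {}
--     if targets is None:
--         for h in sources:
--             reach = set()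
--             Q = deque([h])
--             while Q:
--                 x = Q.popleft()
--                 reach.add(x)
--                 Q.extend(N.get(x, ()))
--             rv[h] = reach
--     else:
--         targets = set(targets)
--
--         for h in sources:
--             reach = set()
--             Q = deque([h])
--             while Q:
--                 x = Q.popleft()
--                 reach.add(x)
--                 if x not in targets:
--                     Q.extend(N.get(x, ()))
--             rv[h] = reach
--     return rv
-- ===== SOURCE B (Python) =====
-- from collections import deque
--
--
-- def reachable(N, sources=None, targets=None):
--     if sources is None:
--         sources = N.keys() - {y for ys in N.values() for y in ys}
--     ts = set(targets) if targets is not None else set()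
--     rv = {}
--     for h in sources:
--         reach = set()
--         Q = deque([h])
--         while Q:
--             x = Q.popleft()
--             if x in reach:
--                 continue
--             reach.add(x)
--             if x not in ts:
--                 Q.extend(N.get(x, ()))
--         rv[h] = reach
--     return rv
-- ===== Notes on version B (the rewrite author's own statement) =====
-- stated objective: alternative
-- what changed: B adds the standard BFS visited check (skip a popped node already in reach) so each node is expanded at most once, instead of A's visited-free queue that re-expands every duplicate queue entry.
-- outside the precondition, e.g. on reachable({1: [2], 2: [2]}, [3], None): A returns {3: {3}}, B returns {3: {3}}; on reachable({1: [1]}, [1], [1]): A returns {1: {1}}, B returns {1: {1}}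
import Mathlib
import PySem

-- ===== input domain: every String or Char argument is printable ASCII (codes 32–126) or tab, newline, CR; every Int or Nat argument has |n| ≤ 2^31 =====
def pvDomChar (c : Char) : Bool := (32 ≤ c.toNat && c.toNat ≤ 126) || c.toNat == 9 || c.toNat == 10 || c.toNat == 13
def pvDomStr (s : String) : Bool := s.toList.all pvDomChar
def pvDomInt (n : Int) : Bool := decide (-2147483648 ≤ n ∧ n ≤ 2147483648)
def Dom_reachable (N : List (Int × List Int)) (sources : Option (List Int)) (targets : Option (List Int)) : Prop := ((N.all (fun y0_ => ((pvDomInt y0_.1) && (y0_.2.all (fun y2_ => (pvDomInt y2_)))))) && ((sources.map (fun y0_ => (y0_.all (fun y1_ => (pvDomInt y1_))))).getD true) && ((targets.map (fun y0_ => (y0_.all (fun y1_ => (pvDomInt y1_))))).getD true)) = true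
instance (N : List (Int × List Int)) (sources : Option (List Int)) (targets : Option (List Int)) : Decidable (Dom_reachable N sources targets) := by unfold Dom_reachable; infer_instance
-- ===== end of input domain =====

-- B adds the standard visited check to A's BFS (skip an already-reached node instead of
-- re-expanding it), which A's queue-only BFS lacks; return-value equivalence on acyclic graphs.


-- ===== PORT A =====
-- N.get(x, ()) on the association list (first match)
def pyGetAdj (N : List (Int × List Int)) (x : Int) : List Int :=
  match N with
  | [] => []
  | (k, v) :: rest => if k == x then v else pyGetAdj rest x

-- total number of adjacency entries, and fuel bounds for the two while-loops
def adjTotal (N : List (Int × List Int)) : Nat := (N.map (fun p => p.2.length)).sum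

-- headwaters(N): N.keys() - chain.from_iterable(N.values()); a set, iterated here in key
-- order (each rv entry depends only on its own key, and dict outputs are order-insensitive)
def headwatersP (N : List (Int × List Int)) : List Int :=
  PySem.Set.diff (PySem.Set.ofList (N.map (fun p : Int × List Int => p.1))) (N.flatMap (fun p : Int × List Int => p.2))

-- A's while-loop: pop, add to reach, (if not a target) extend the queue — no visited check.
-- Fuel (adjTotal+1)^(|N|+1) is proved sufficient on acyclic graphs (Pre_) below.
def reachLoopA (N : List (Int × List Int)) (tset : Option (List Int)) :
    Nat → List Int → List Int → List Int
  | 0, _, reach => reach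
  | _ + 1, [], reach => reach
  | f + 1, x :: Q, reach =>
    let reach' := PySem.Set.add reach x
    match tset with
    | none => reachLoopA N none f (Q ++ pyGetAdj N x) reach'
    | some ts =>
      reachLoopA N (some ts) f
        (if PySem.Set.contains ts x then Q else Q ++ pyGetAdj N x) reach'

def fuelA (N : List (Int × List Int)) : Nat := (adjTotal N + 1) ^ (N.length + 1)

def reachable (N : List (Int × List Int)) (sources : Option (List Int)) (targets : Option (List Int)) : List (Int × List Int) :=
  let srcs := match sources with
    | none => headwatersP N
    | some s => s
  let tset := targets.map PySem.Set.ofList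
  (srcs.foldl (fun (rv : PySem.Dict Int (List Int)) h => rv.insert h (reachLoopA N tset (fuelA N) [h] []))
    PySem.Dict.empty).items

-- ===== PORT B =====
-- B's while-loop: pop, SKIP if already reached, else add and (if not a target) extend.
-- Each node is expanded at most once, so fuel adjTotal+1 always suffices (proved below).
def reachLoopB (N : List (Int × List Int)) (ts : List Int) :
    Nat → List Int → List Int → List Int
  | 0, _, reach => reach
  | _ + 1, [], reach => reach
  | f + 1, x :: Q, reach =>
    if PySem.Set.contains reach x then reachLoopB N ts f Q reach
    else
      reachLoopB N ts f
        (if PySem.Set.contains ts x then Q else Q ++ pyGetAdj N x)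
        (PySem.Set.add reach x)

def fuelB (N : List (Int × List Int)) : Nat := adjTotal N + 1

def reachable_alt (N : List (Int × List Int)) (sources : Option (List Int)) (targets : Option (List Int)) : List (Int × List Int) :=
  let srcs := match sources with
    | none => PySem.Set.diff (PySem.Set.ofList (N.map (fun p : Int × List Int => p.1))) (N.flatMap (fun p : Int × List Int => p.2))
    | some s => s
  let ts := match targets with
    | none => ([] : List Int)
    | some t => PySem.Set.ofList t
  (srcs.foldl (fun (rv : PySem.Dict Int (List Int)) h => rv.insert h (reachLoopB N ts (fuelB N) [h] []))
    PySem.Dict.empty).items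

-- ===== PRECONDITION & SPEC =====
-- hasWalk N k x: some directed walk of length k leaves x (an edge x→y for every pair
-- (x, vs) ∈ N with y ∈ vs); a closed-form graph-shape condition, independent of the ports
def hasWalk (N : List (Int × List Int)) : Nat → Int → Bool
  | 0, _ => true
  | k + 1, x => N.any (fun p => p.1 == x && p.2.any (hasWalk N k))

-- Pre_ excludes graphs with a directed cycle: on a cycle reachable from a source (and not cut
-- by targets) A's visited-free BFS queue grows forever and A never returns; acyclicity of the
-- whole graph is the simple safe condition, so it also excludes some cyclic graphs whose cycle
-- no source reaches, on which A does return (see cites).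
def Pre_reachable (N : List (Int × List Int)) (sources : Option (List Int)) (targets : Option (List Int)) : Prop :=
  ∀ x ∈ N.map Prod.fst, hasWalk N (N.length + 1) x = false

instance (N : List (Int × List Int)) (sources : Option (List Int)) (targets : Option (List Int)) : Decidable (Pre_reachable N sources targets) := by
  unfold Pre_reachable; infer_instance

def pvWitness_reachable : (List (Int × List Int)) × Option (List Int) × Option (List Int) :=
  ([(1, [2, 3]), (2, [3])], none, some [2])

def Spec_reachable (N : List (Int × List Int)) (sources : Option (List Int)) (targets : Option (List Int)) (out : List (Int × List Int)) : Prop := out = reachable_alt N sources targets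
instance (N : List (Int × List Int)) (sources : Option (List Int)) (targets : Option (List Int)) (out : List (Int × List Int)) : Decidable (Spec_reachable N sources targets out) := by unfold Spec_reachable; infer_instance

-- ===== CLAIM (what is proved, stated in full; the proofs are below) =====
def Claim_equal_reachable : Prop := ∀ (N : List (Int × List Int)) (sources : Option (List Int)) (targets : Option (List Int)), Dom_reachable N sources targets → Pre_reachable N sources targets → Spec_reachable N sources targets (reachable N sources targets)

-- ===== LEMMAS AND PROOFS =====

-- rank: the largest k ≤ m with a walk of length k from x
def rnkAux (N : List (Int × List Int)) (x : Int) : Nat → Nat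
  | 0 => 0
  | k + 1 => if hasWalk N (k + 1) x then k + 1 else rnkAux N x k

def rnk (N : List (Int × List Int)) (x : Int) : Nat := rnkAux N x N.length

-- potential of A's queue: Σ (S+1)^rnk x, strictly decreasing along A's loop on acyclic graphs
def phi (N : List (Int × List Int)) (Q : List Int) : Nat :=
  (Q.map (fun x => (adjTotal N + 1) ^ rnk N x)).sum

-- adjacency entries of keys not yet reached
def sumRem (N : List (Int × List Int)) (R : List Int) : Nat :=
  ((N.filter (fun p => !R.contains p.1)).map (fun p : Int × List Int => p.2.length)).sum

-- potential of B's state: bounds B's remaining pops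
def psi (N : List (Int × List Int)) (R Q : List Int) : Nat := Q.length + sumRem N R

-- Emb G qa qb: qa is qb with extra entries inserted, each extra entry being in G or among the
-- kept entries before it ("already reached, or still to be reached by B earlier")
inductive Emb : List Int → List Int → List Int → Prop
  | nil (G) : Emb G [] []
  | keep {G x qa qb} : Emb (x :: G) qa qb → Emb G (x :: qa) (x :: qb)
  | skip {G x qa qb} : x ∈ G → Emb G qa qb → Emb G (x :: qa) qb

-- every expanded reached node has its neighbours reached or queued in B's queue
def Closure (N : List (Int × List Int)) (ts R Qb : List Int) : Prop :=
  ∀ x ∈ R, PySem.Set.contains ts x = false → ∀ y ∈ pyGetAdj N x, y ∈ R ∨ y ∈ Qb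

lemma adjTotal_cons (k : Int) (v : List Int) (rest : List (Int × List Int)) :
    adjTotal ((k, v) :: rest) = v.length + adjTotal rest := by
  simp [adjTotal]

lemma pyGetAdj_length_le (N : List (Int × List Int)) (x : Int) :
    (pyGetAdj N x).length ≤ adjTotal N := by
  induction N with
  | nil => simp [pyGetAdj, adjTotal]
  | cons p rest ih =>
    obtain ⟨k, v⟩ := p
    rw [adjTotal_cons]
    by_cases h : (k == x) = true
    · simp [pyGetAdj, h]
    · simp only [pyGetAdj, h, Bool.false_eq_true, if_false]
      omega

lemma pyGetAdj_ne_nil_mem_keys {N : List (Int × List Int)} {x : Int}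
    (h : pyGetAdj N x ≠ []) : x ∈ N.map Prod.fst := by
  induction N with
  | nil => simp [pyGetAdj] at h
  | cons p rest ih =>
    obtain ⟨k, v⟩ := p
    by_cases hk : (k == x) = true
    · simp [(by simpa using hk : k = x)]
    · simp only [pyGetAdj, hk, Bool.false_eq_true, if_false] at h
      simpa using Or.inr (by simpa using ih h)

lemma rnkAux_le (N : List (Int × List Int)) (x : Int) (m : Nat) : rnkAux N x m ≤ m := by
  induction m with
  | zero => simp [rnkAux]
  | succ k ih => by_cases h : hasWalk N (k + 1) x <;> simp [rnkAux, h] <;> omega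

lemma walk_rnkAux (N : List (Int × List Int)) (x : Int) (m : Nat) :
    hasWalk N (rnkAux N x m) x = true := by
  induction m with
  | zero => simp [rnkAux, hasWalk]
  | succ k ih => by_cases h : hasWalk N (k + 1) x <;> simp [rnkAux, h, ih]

lemma le_rnkAux {N : List (Int × List Int)} {x : Int} {k m : Nat}
    (hw : hasWalk N k x = true) (hk : k ≤ m) : k ≤ rnkAux N x m := by
  induction m with
  | zero => omega
  | succ j ih =>
    by_cases h : hasWalk N (j + 1) x
    · simp [rnkAux, h]; omega
    · simp only [rnkAux, h, if_false, Bool.false_eq_true]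
      rcases Nat.lt_or_ge k (j + 1) with hlt | hge
      · exact ih (by omega)
      · exfalso
        have hkj : k = j + 1 := by omega
        rw [hkj] at hw
        exact h hw

lemma pyGetAdj_entry {N : List (Int × List Int)} {x : Int}
    (h : pyGetAdj N x ≠ []) : (x, pyGetAdj N x) ∈ N := by
  induction N with
  | nil => simp [pyGetAdj] at h
  | cons p rest ih =>
    obtain ⟨k, v⟩ := p
    by_cases hk : (k == x) = true
    · have hkx : k = x := by simpa using hk
      subst hkx
      simp [pyGetAdj]
    · simp only [pyGetAdj, hk, Bool.false_eq_true, if_false] at h ⊢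
      exact List.mem_cons_of_mem _ (ih h)

lemma hasWalk_succ_of_adj {N : List (Int × List Int)} {x y : Int} {k : Nat}
    (hy : y ∈ pyGetAdj N x) (hw : hasWalk N k y = true) : hasWalk N (k + 1) x = true := by
  have hne : pyGetAdj N x ≠ [] := fun h => by simp [h] at hy
  have hmem := pyGetAdj_entry hne
  simp only [hasWalk, List.any_eq_true]
  refine ⟨(x, pyGetAdj N x), hmem, ?_⟩
  simp only [Bool.and_eq_true, beq_iff_eq, List.any_eq_true]
  exact ⟨trivial, y, hy, hw⟩

lemma walk_one_of_ne_nil {N : List (Int × List Int)} {x : Int}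
    (h : pyGetAdj N x ≠ []) : hasWalk N 1 x = true := by
  cases hA : pyGetAdj N x with
  | nil => exact absurd hA h
  | cons y ys =>
    exact hasWalk_succ_of_adj (y := y) (by simp [hA]) (by simp [hasWalk])

-- rank strictly decreases along an edge, on acyclic graphs
lemma rnk_lt_of_mem_adj {N : List (Int × List Int)} {x y : Int}
    (hpre : ∀ z ∈ N.map Prod.fst, hasWalk N (N.length + 1) z = false)
    (hy : y ∈ pyGetAdj N x) : rnk N y < rnk N x := by
  have hne : pyGetAdj N x ≠ [] := fun h => by simp [h] at hy
  have hxk : x ∈ N.map Prod.fst := pyGetAdj_ne_nil_mem_keys hne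
  have hwy : hasWalk N (rnk N y) y = true := walk_rnkAux N y N.length
  have hwx : hasWalk N (rnk N y + 1) x = true := hasWalk_succ_of_adj hy hwy
  have hylen : rnk N y ≤ N.length := rnkAux_le N y N.length
  rcases Nat.lt_or_ge (rnk N y) N.length with hlt | hge
  · have hle : rnk N y + 1 ≤ rnkAux N x N.length :=
      le_rnkAux (N := N) (x := x) (m := N.length) hwx (by omega)
    simp only [rnk] at hle ⊢
    omega
  · have hEq : rnk N y = N.length := by omega
    rw [hEq] at hwx
    exact absurd hwx (by simp [hpre x hxk])

lemma phi_cons (N : List (Int × List Int)) (x : Int) (Q : List Int) :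
    phi N (x :: Q) = (adjTotal N + 1) ^ rnk N x + phi N Q := by
  simp [phi]

lemma phi_append (N : List (Int × List Int)) (Q Q' : List Int) :
    phi N (Q ++ Q') = phi N Q + phi N Q' := by
  simp [phi]

lemma phi_pos (N : List (Int × List Int)) (x : Int) (Q : List Int) :
    1 ≤ phi N (x :: Q) := by
  rw [phi_cons]
  have : 0 < (adjTotal N + 1) ^ rnk N x := Nat.pow_pos (by omega)
  omega

lemma rnk_pos_of_adj_ne_nil {N : List (Int × List Int)} {x : Int}
    (h : pyGetAdj N x ≠ []) : 1 ≤ rnk N x := by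
  have hxk : x ∈ N.map Prod.fst := pyGetAdj_ne_nil_mem_keys h
  have hlen : 1 ≤ N.length := by
    cases N with
    | nil => simp at hxk
    | cons _ _ => simp
  exact le_rnkAux (walk_one_of_ne_nil h) hlen

-- the decisive potential bound: expanding x costs strictly less than x's own potential
lemma phi_adj_lt {N : List (Int × List Int)} {x : Int}
    (hpre : ∀ z ∈ N.map Prod.fst, hasWalk N (N.length + 1) z = false) :
    phi N (pyGetAdj N x) < (adjTotal N + 1) ^ rnk N x := by
  by_cases hne : pyGetAdj N x = []
  · rw [hne]
    have : 0 < (adjTotal N + 1) ^ rnk N x := Nat.pow_pos (by omega)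
    simpa [phi] using this
  · have hr1 : 1 ≤ rnk N x := rnk_pos_of_adj_ne_nil hne
    have hbound : ∀ t ∈ (pyGetAdj N x).map (fun y => (adjTotal N + 1) ^ rnk N y),
        t ≤ (adjTotal N + 1) ^ (rnk N x - 1) := by
      intro t ht
      rcases List.mem_map.mp ht with ⟨y, hy, rfl⟩
      exact Nat.pow_le_pow_right (by omega) (by have := rnk_lt_of_mem_adj hpre hy; omega)
    have hsum : phi N (pyGetAdj N x) ≤
        (pyGetAdj N x).length * (adjTotal N + 1) ^ (rnk N x - 1) := by
      have := List.sum_le_card_nsmul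
        ((pyGetAdj N x).map (fun y => (adjTotal N + 1) ^ rnk N y))
        ((adjTotal N + 1) ^ (rnk N x - 1)) hbound
      simpa [phi, Nat.smul_one_eq_cast] using this
    have hlt : (pyGetAdj N x).length * (adjTotal N + 1) ^ (rnk N x - 1) <
        (adjTotal N + 1) ^ rnk N x := by
      calc (pyGetAdj N x).length * (adjTotal N + 1) ^ (rnk N x - 1)
          ≤ adjTotal N * (adjTotal N + 1) ^ (rnk N x - 1) :=
            Nat.mul_le_mul_right _ (pyGetAdj_length_le N x)
        _ < (adjTotal N + 1) * (adjTotal N + 1) ^ (rnk N x - 1) := by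
            have hpow : 0 < (adjTotal N + 1) ^ (rnk N x - 1) := Nat.pow_pos (by omega)
            exact (Nat.mul_lt_mul_right hpow).mpr (by omega)
        _ = (adjTotal N + 1) ^ (rnk N x - 1 + 1) := by ring
        _ = (adjTotal N + 1) ^ rnk N x := by congr 1; omega
    omega

lemma phi_eq_zero_nil {N : List (Int × List Int)} {Q : List Int}
    (h : phi N Q = 0) : Q = [] := by
  cases Q with
  | nil => rfl
  | cons x q => have := phi_pos N x q; omega

-- sumRem lemmas
lemma sumRem_cons (k : Int) (v : List Int) (rest : List (Int × List Int)) (R : List Int) :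
    sumRem ((k, v) :: rest) R = (if R.contains k then 0 else v.length) + sumRem rest R := by
  by_cases h : k ∈ R <;> simp [sumRem, List.filter_cons, h]

lemma sumRem_anti (N : List (Int × List Int)) (R : List Int) (x : Int) :
    sumRem N (R ++ [x]) ≤ sumRem N R := by
  induction N with
  | nil => simp [sumRem]
  | cons p rest ih =>
    obtain ⟨k, v⟩ := p
    rw [sumRem_cons, sumRem_cons]
    by_cases h : R.contains k = true
    · have h1 : (R ++ [x]).contains k = true := by
        simp only [List.contains_eq_mem, decide_eq_true_eq] at h ⊢
        simp [List.mem_append, h]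
      rw [if_pos h, if_pos h1]
      simpa using ih
    · rw [if_neg h]
      split_ifs with h1 <;> omega

lemma sumRem_drop {N : List (Int × List Int)} {R : List Int} {x : Int}
    (hx : x ∉ R) : sumRem N (R ++ [x]) + (pyGetAdj N x).length ≤ sumRem N R := by
  induction N with
  | nil => simp [sumRem, pyGetAdj]
  | cons p rest ih =>
    obtain ⟨k, v⟩ := p
    rw [sumRem_cons, sumRem_cons]
    by_cases hk : (k == x) = true
    · have hkx : k = x := by simpa using hk
      subst hkx
      have h1 : (R ++ [k]).contains k = true := by simp [List.contains_eq_mem]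
      have h2 : ¬ (R.contains k = true) := by simp [List.contains_eq_mem, hx]
      rw [if_pos h1, if_neg h2]
      have hadj : pyGetAdj ((k, v) :: rest) k = v := by simp [pyGetAdj]
      rw [hadj]
      have := sumRem_anti rest R k
      omega
    · have hadj : pyGetAdj ((k, v) :: rest) x = pyGetAdj rest x := by
        simp [pyGetAdj, hk]
      rw [hadj]
      have hkx : ¬ k = x := by simpa using hk
      have hc : (R ++ [x]).contains k = R.contains k := by
        simp [List.contains_eq_mem, List.mem_append, hkx]
      rw [hc]
      split_ifs with h1 <;> omega

-- Emb lemmas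
lemma emb_mono {G G' qa qb : List Int} (h : Emb G qa qb) (hsub : ∀ y ∈ G, y ∈ G') :
    Emb G' qa qb := by
  induction h generalizing G' with
  | nil => exact Emb.nil G'
  | keep _ ih =>
    refine Emb.keep (ih ?_)
    intro y hy
    rcases List.mem_cons.mp hy with rfl | hy
    · exact List.mem_cons_self
    · exact List.mem_cons_of_mem _ (hsub _ hy)
  | skip hmem _ ih => exact Emb.skip (hsub _ hmem) (ih hsub)

lemma emb_refl (G l : List Int) : Emb G l l := by
  induction l generalizing G with
  | nil => exact Emb.nil G
  | cons x t ih => exact Emb.keep (ih (x :: G))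

lemma emb_of_all_mem {G ex : List Int} (h : ∀ y ∈ ex, y ∈ G) : Emb G ex [] := by
  induction ex with
  | nil => exact Emb.nil G
  | cons x t ih =>
    exact Emb.skip (h x (by simp)) (ih (fun y hy => h y (by simp [hy])))

lemma emb_append_right {G qa qb : List Int} (ex : List Int) (h : Emb G qa qb)
    (hex : ∀ y ∈ ex, y ∈ G ∨ y ∈ qb) : Emb G (qa ++ ex) qb := by
  induction h with
  | nil =>
    refine emb_of_all_mem (fun y hy => ?_)
    rcases hex y hy with h | h
    · exact h
    · exact absurd h List.not_mem_nil
  | @keep G x qa qb _ ih =>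
    refine Emb.keep (ih ?_)
    intro y hy
    rcases hex y hy with h | h
    · exact Or.inl (by simp [h])
    · rcases (by simpa using h : y = x ∨ y ∈ qb) with rfl | h
      · exact Or.inl (by simp)
      · exact Or.inr h
  | skip hmem _ ih => exact Emb.skip hmem (ih hex)

lemma emb_append_both {G qa qb : List Int} (ex : List Int) (h : Emb G qa qb) :
    Emb G (qa ++ ex) (qb ++ ex) := by
  induction h with
  | nil => simpa using emb_refl _ ex
  | keep _ ih => exact Emb.keep ih
  | skip hmem _ ih => exact Emb.skip hmem ih

lemma emb_nil_left {G qb : List Int} (h : Emb G [] qb) : qb = [] := by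
  cases h; rfl

-- fuel 0 and empty queue both return reach, for either loop
lemma loopB_nil (N : List (Int × List Int)) (ts : List Int) (f : Nat) (R : List Int) :
    reachLoopB N ts f [] R = R := by
  cases f <;> rfl

-- THE SIMULATION: on acyclic graphs A's visited-free loop and B's visited-checked loop agree
lemma main_sim (N : List (Int × List Int)) (ts : List Int)
    (hpre : ∀ z ∈ N.map Prod.fst, hasWalk N (N.length + 1) z = false) :
    ∀ fA fB Qa Qb R, Emb R Qa Qb → Closure N ts R Qb →
      phi N Qa ≤ fA → psi N R Qb ≤ fB →
      reachLoopA N (some ts) fA Qa R = reachLoopB N ts fB Qb R := by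
  intro fA
  induction fA with
  | zero =>
    intro fB Qa Qb R hemb _ hphi _
    have hQa : Qa = [] := phi_eq_zero_nil (Nat.le_zero.mp hphi)
    subst hQa
    rw [emb_nil_left hemb]
    simp [reachLoopA, loopB_nil]
  | succ f ih =>
    intro fB Qa Qb R hemb hcl hphi hpsi
    cases Qa with
    | nil =>
      rw [emb_nil_left hemb]
      simp [reachLoopA, loopB_nil]
    | cons x qa =>
      cases hemb with
      | skip hxR hemb' =>
        -- A alone pops a duplicate entry x ∈ R
        have hreach : PySem.Set.add R x = R := PySem.Set.add_of_mem hxR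
        show reachLoopA N (some ts) f _ (PySem.Set.add R x) = _
        rw [hreach]
        by_cases hts : PySem.Set.contains ts x = true
        · rw [if_pos hts]
          refine ih fB qa Qb R hemb' hcl ?_ hpsi
          have hp : 1 ≤ (adjTotal N + 1) ^ rnk N x := Nat.pow_pos (by omega)
          rw [phi_cons] at hphi
          omega
        · rw [if_neg hts]
          refine ih fB (qa ++ pyGetAdj N x) Qb R ?_ hcl ?_ hpsi
          · exact emb_append_right _ hemb'
              (fun y hy => hcl x hxR (by simpa using hts) y hy)
          · rw [phi_append]
            have := phi_adj_lt (N := N) (x := x) hpre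
            rw [phi_cons] at hphi
            omega
      | @keep _ _ _ qb hemb' =>
        -- both loops pop x
        have hfB : 1 ≤ fB := by
          have : 1 ≤ psi N R (x :: qb) := by simp only [psi, List.length_cons]; omega
          omega
        obtain ⟨g, rfl⟩ : ∃ g, fB = g + 1 := ⟨fB - 1, by omega⟩
        by_cases hxR : x ∈ R
        · -- B skips, A re-expands
          have hcont : PySem.Set.contains R x = true := (PySem.Set.contains_iff R x).mpr hxR
          have hreach : PySem.Set.add R x = R := PySem.Set.add_of_mem hxR
          show reachLoopA N (some ts) f _ (PySem.Set.add R x) =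
            reachLoopB N ts (g + 1) (x :: qb) R
          rw [hreach]
          simp only [reachLoopB, hcont, if_pos]
          have hemb'' : Emb R qa qb := by
            refine emb_mono hemb' ?_
            intro y hy
            rcases List.mem_cons.mp hy with rfl | hy
            · exact hxR
            · exact hy
          have hcl' : Closure N ts R qb := by
            intro z hz hzt y hy
            rcases hcl z hz hzt y hy with h | h
            · exact Or.inl h
            · rcases (by simpa using h : y = x ∨ y ∈ qb) with rfl | h
              · exact Or.inl hxR
              · exact Or.inr h
          have hpsi' : psi N R qb ≤ g := by simp only [psi, List.length_cons] at hpsi ⊢; omega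
          by_cases hts : PySem.Set.contains ts x = true
          · rw [if_pos hts]
            refine ih g qa qb R hemb'' hcl' ?_ hpsi'
            rw [phi_cons] at hphi
            have hp : 1 ≤ (adjTotal N + 1) ^ rnk N x := Nat.pow_pos (by omega)
            omega
          · rw [if_neg hts]
            refine ih g (qa ++ pyGetAdj N x) qb R ?_ hcl' ?_ hpsi'
            · exact emb_append_right _ hemb''
                (fun y hy => hcl' x hxR (by simpa using hts) y hy)
            · rw [phi_append]
              have := phi_adj_lt (N := N) (x := x) hpre
              rw [phi_cons] at hphi
              omega
        · -- x is new: both add it; same branch on targets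
          have hcont : PySem.Set.contains R x = false := by
            simpa using (fun h => hxR ((PySem.Set.contains_iff R x).mp h))
          have hreach : PySem.Set.add R x = R ++ [x] := PySem.Set.add_of_not_mem hxR
          show reachLoopA N (some ts) f _ (PySem.Set.add R x) =
            reachLoopB N ts (g + 1) (x :: qb) R
          simp only [reachLoopB, hcont, Bool.false_eq_true, if_false, hreach]
          have hembR : Emb (R ++ [x]) qa qb := by
            refine emb_mono hemb' ?_
            intro y hy
            rcases List.mem_cons.mp hy with rfl | hy
            · simp
            · simp [hy]
          have hdrop := sumRem_drop (N := N) hxR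
          by_cases hts : PySem.Set.contains ts x = true
          · rw [if_pos hts, if_pos hts]
            refine ih g qa qb (R ++ [x]) hembR ?_ ?_ ?_
            · intro z hz hzt y hy
              rcases (by simpa using hz : z ∈ R ∨ z = x) with hz | rfl
              · rcases hcl z hz hzt y hy with h | h
                · exact Or.inl (by simp [h])
                · rcases (by simpa using h : y = x ∨ y ∈ qb) with rfl | h
                  · exact Or.inl (by simp)
                  · exact Or.inr h
              · rw [hts] at hzt
                exact absurd hzt (by simp)
            · rw [phi_cons] at hphi
              have hp : 1 ≤ (adjTotal N + 1) ^ rnk N x := Nat.pow_pos (by omega)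
              omega
            · have := sumRem_anti N R x
              simp only [psi, List.length_cons] at hpsi ⊢
              omega
          · rw [if_neg hts, if_neg hts]
            refine ih g (qa ++ pyGetAdj N x) (qb ++ pyGetAdj N x) (R ++ [x])
              (emb_append_both _ hembR) ?_ ?_ ?_
            · intro z hz hzt y hy
              rcases (by simpa using hz : z ∈ R ∨ z = x) with hz | rfl
              · rcases hcl z hz hzt y hy with h | h
                · exact Or.inl (by simp [h])
                · rcases (by simpa using h : y = x ∨ y ∈ qb) with rfl | h
                  · exact Or.inl (by simp)
                  · exact Or.inr (by simp [h])
              · exact Or.inr (by simp [hy])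
            · rw [phi_append]
              have := phi_adj_lt (N := N) (x := x) hpre
              rw [phi_cons] at hphi
              omega
            · simp only [psi, List.length_cons, List.length_append] at hpsi ⊢
              omega

-- A's loop with no targets behaves as with an empty target set
lemma loopA_none_eq_empty (N : List (Int × List Int)) :
    ∀ f Qa R, reachLoopA N none f Qa R = reachLoopA N (some []) f Qa R := by
  intro f
  induction f with
  | zero => intro Qa R; rfl
  | succ f ih =>
    intro Qa R
    cases Qa with
    | nil => rfl
    | cons x qa =>
      show reachLoopA N none f _ _ = reachLoopA N (some []) f _ _
      simp only [PySem.Set.contains]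
      norm_num
      exact ih _ _

lemma sumRem_nil_R (N : List (Int × List Int)) : sumRem N [] = adjTotal N := by
  simp [sumRem, adjTotal]

-- per-source equality with the stated fuels
lemma per_source (N : List (Int × List Int)) (ts : List Int) (h : Int)
    (hpre : ∀ z ∈ N.map Prod.fst, hasWalk N (N.length + 1) z = false) :
    reachLoopA N (some ts) (fuelA N) [h] [] = reachLoopB N ts (fuelB N) [h] [] := by
  refine main_sim N ts hpre (fuelA N) (fuelB N) [h] [h] [] (Emb.keep (Emb.nil _)) ?_ ?_ ?_
  · intro z hz; simp at hz
  · have h1 : rnk N h ≤ N.length := rnkAux_le N h N.length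
    have h2 : (adjTotal N + 1) ^ rnk N h ≤ (adjTotal N + 1) ^ (N.length + 1) :=
      Nat.pow_le_pow_right (by omega) (by omega)
    simp only [phi, List.map_cons, List.map_nil, List.sum_cons, List.sum_nil, fuelA]
    omega
  · simp only [psi, sumRem_nil_R, fuelB, List.length_cons, List.length_nil]
    omega


-- ===== VERDICT (by name: the statement is the Claim_ definition above) =====
theorem reachable_spec : Claim_equal_reachable := by
  intro N sources targets _ hpre
  unfold Spec_reachable reachable reachable_alt
  cases targets with
  | none =>
    simp only [Option.map_none]
    have hfun : (fun (rv : PySem.Dict Int (List Int)) h =>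
        rv.insert h (reachLoopA N none (fuelA N) [h] [])) =
        (fun (rv : PySem.Dict Int (List Int)) h =>
        rv.insert h (reachLoopB N [] (fuelB N) [h] [])) := by
      funext rv h
      rw [loopA_none_eq_empty, per_source N [] h hpre]
    rw [hfun]
    simp only [headwatersP]
  | some t =>
    simp only [Option.map_some]
    have hfun : (fun (rv : PySem.Dict Int (List Int)) h =>
        rv.insert h (reachLoopA N (some (PySem.Set.ofList t)) (fuelA N) [h] [])) =
        (fun (rv : PySem.Dict Int (List Int)) h =>
        rv.insert h (reachLoopB N (PySem.Set.ofList t) (fuelB N) [h] [])) := by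
      funext rv h
      rw [per_source N (PySem.Set.ofList t) h hpre]
    rw [hfun]
    simp only [headwatersP]
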